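-- pv_equiv track=rewrite | github.com/lontivero/vot.ar | msa/core/packing/numpacker.py | char_to_num
-- ===== SOURCE A (Python) =====
-- def char_to_num(string):
--     r = 0
--     for c in string:
--         if r == 0:
--             r = ord(c)
--         else:
--             r = (r << 8) + ord(c)
--     return r
-- ===== SOURCE B (Python) =====
-- def char_to_num(string):
--     n = len(string)
--     return sum(ord(c) << (8 * (n - 1 - i)) for i, c in enumerate(string))
-- ===== Notes on version B (the rewrite author's own statement) =====
-- stated objective: alternative
-- what changed: Replaces the running shift-accumulate loop (with its r==0 branch) by a single position-weighted sum: each character contributes ord(c) << 8*(n-1-i), summed over enumerate.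
import Mathlib
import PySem

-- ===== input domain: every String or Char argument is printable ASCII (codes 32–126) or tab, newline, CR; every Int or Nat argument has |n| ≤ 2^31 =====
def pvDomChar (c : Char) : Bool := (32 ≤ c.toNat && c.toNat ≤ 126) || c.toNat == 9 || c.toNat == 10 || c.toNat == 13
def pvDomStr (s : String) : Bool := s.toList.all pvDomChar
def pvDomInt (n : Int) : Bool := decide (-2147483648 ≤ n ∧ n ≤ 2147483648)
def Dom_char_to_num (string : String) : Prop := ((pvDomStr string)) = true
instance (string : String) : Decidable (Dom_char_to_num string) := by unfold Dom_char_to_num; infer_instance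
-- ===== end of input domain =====

-- B replaces A's running shift-accumulate (with its r==0 branch) by a position-weighted sum over enumerate; same O(n) cost, different decomposition.


-- ===== PORT A =====
-- r = 0; for c in string: if r == 0: r = ord(c) else: r = (r << 8) + ord(c); return r
def char_to_num (string : String) : Int :=
  string.toList.foldl
    (fun r c => if r == 0 then (c.toNat : Int) else (r <<< (8 : Nat)) + (c.toNat : Int)) 0

-- ===== PORT B =====
-- n = len(string); sum(ord(c) << (8*(n-1-i)) for i, c in enumerate(string))
-- (List.zipIdx is Lean's enumerate, with the pair components swapped: (c, i))
def char_to_num_alt (string : String) : Int :=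
  let n := string.toList.length
  (string.toList.zipIdx.map
    (fun ci => (ci.1.toNat : Int) <<< (8 * (n - 1 - ci.2) : Nat))).sum

-- ===== PRECONDITION & SPEC =====
def Spec_char_to_num (string : String) (out : Int) : Prop := out = char_to_num_alt string
instance (string : String) (out : Int) : Decidable (Spec_char_to_num string out) := by unfold Spec_char_to_num; infer_instance

-- ===== CLAIM (what is proved, stated in full; the proofs are below) =====
def Claim_equal_char_to_num : Prop := ∀ (string : String), Dom_char_to_num string → Spec_char_to_num string (char_to_num string)

-- ===== LEMMAS AND PROOFS =====

-- the common value: big-endian base-256 value of the character codes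
def pvVal : List Char → Int
  | [] => 0
  | c :: t => (c.toNat : Int) * 256 ^ t.length + pvVal t

-- A's loop from a positive accumulator never hits the r == 0 branch again
lemma foldA_pos (l : List Char) : ∀ r : Int, 0 < r →
    l.foldl (fun r c => if r == 0 then (c.toNat : Int) else (r <<< (8 : Nat)) + (c.toNat : Int)) r
      = r * 256 ^ l.length + pvVal l := by
  induction l with
  | nil => intro r _; simp [pvVal]
  | cons c t ih =>
    intro r hr
    have hne : (r == 0) = false := by simp; omega
    have hc : (0 : Int) ≤ (c.toNat : Int) := by positivity
    have hshift : (r <<< (8 : Nat)) = r * 256 := by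
      rw [Int.shiftLeft_eq]; norm_num
    simp only [List.foldl_cons, hne, Bool.false_eq_true, if_false, hshift]
    rw [ih (r * 256 + (c.toNat : Int)) (by nlinarith)]
    simp [pvVal, List.length_cons, pow_succ]
    ring

-- B's enumerated sum, generalized over the start index
lemma sumB (l : List Char) : ∀ (k n : Nat), k + l.length = n →
    (l.zipIdx k |>.map (fun ci => ((ci.1.toNat : Int)) <<< (8 * (n - 1 - ci.2) : Nat))).sum
      = pvVal l := by
  induction l with
  | nil => intro k n _; simp [pvVal]
  | cons c t ih =>
    intro k n hn
    simp only [List.zipIdx_cons, List.map_cons, List.sum_cons]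
    rw [ih (k + 1) n (by simp at hn ⊢; omega)]
    have h1 : n - 1 - k = t.length := by simp at hn; omega
    rw [h1, Int.shiftLeft_eq, pvVal]
    norm_num [pow_mul]

-- ===== VERDICT (by name: the statement is the Claim_ definition above) =====
theorem char_to_num_spec : Claim_equal_char_to_num := by
  intro s hdom
  unfold Spec_char_to_num
  cases hl : s.toList with
  | nil => simp [char_to_num, char_to_num_alt, hl]
  | cons c t =>
    have hc : 0 < c.toNat := by
      have h := hdom
      unfold Dom_char_to_num pvDomStr at h
      rw [hl] at h
      simp only [List.all_cons, Bool.and_eq_true] at h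
      have h1 := h.1
      unfold pvDomChar at h1
      simp at h1
      omega
    have hcpos : (0 : Int) < (c.toNat : Int) := by exact_mod_cast hc
    have hB : char_to_num_alt s = pvVal (c :: t) := by
      unfold char_to_num_alt
      rw [hl]
      exact sumB (c :: t) 0 (c :: t).length (by simp)
    have hA : char_to_num s = pvVal (c :: t) := by
      unfold char_to_num
      rw [hl]
      simp only [List.foldl_cons]
      rw [if_pos (by decide : ((0 : Int) == 0) = true)]
      rw [foldA_pos t (c.toNat : Int) hcpos, pvVal]
    rw [hA, hB]
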